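-- pv_equiv track=rewrite | github.com/Fergus2299/Algorithmics_class | graph_algos/Graph_Operations.py | simultaneous_sort
-- ===== SOURCE A (Python) =====
-- def simultaneous_sort(a, b):
--     new_a = []
--     new_b = []
--     for ind, elem in enumerate(a):
--         i = len(new_a) - 1
--         while i >= 0 and new_a[i] > elem:
--             i -= 1
--         new_a.insert(i + 1, elem)
--         new_b.insert(i + 1, b[ind])
--     return new_a, new_b
-- ===== SOURCE B (Python) =====
-- def simultaneous_sort(a, b):
--     pairs = [(x, b[i]) for i, x in enumerate(a)]
--     pairs.sort(key=lambda p: p[0])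
--     return [p[0] for p in pairs], [p[1] for p in pairs]
-- ===== Notes on version B (the rewrite author's own statement) =====
-- stated objective: faster
-- what changed: Replaces the hand-written quadratic insertion sort over two parallel lists with a single stable library sort of (a[i], b[i]) pairs keyed on the a-component, then unzips.
import Mathlib
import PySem

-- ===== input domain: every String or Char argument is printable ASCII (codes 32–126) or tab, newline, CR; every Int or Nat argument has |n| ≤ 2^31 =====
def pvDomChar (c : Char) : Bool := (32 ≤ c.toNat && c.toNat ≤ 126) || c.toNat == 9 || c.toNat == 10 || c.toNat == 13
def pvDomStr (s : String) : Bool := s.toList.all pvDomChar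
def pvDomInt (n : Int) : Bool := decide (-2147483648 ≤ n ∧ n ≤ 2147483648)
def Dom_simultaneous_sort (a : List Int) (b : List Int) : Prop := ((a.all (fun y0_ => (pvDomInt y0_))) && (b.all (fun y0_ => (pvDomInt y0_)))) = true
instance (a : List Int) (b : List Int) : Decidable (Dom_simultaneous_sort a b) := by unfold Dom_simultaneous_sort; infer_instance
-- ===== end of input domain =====

-- B replaces A's hand-written quadratic insertion sort over two parallel lists with one
-- stable library sort of (a[i], b[i]) pairs keyed on the a-component, then unzips.

-- ===== PORT A =====
-- the inner 'while i >= 0 and new_a[i] > elem: i -= 1' loop; pyGetD is exact here because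
-- during A's run the scanned index i is always below len(new_a)

def pyScan (na : List Int) (elem : Int) (i : Int) : Int :=
  if 0 ≤ i ∧ PySem.List.pyGetD na i 0 > elem then pyScan na elem (i - 1) else i
termination_by (i + 1).toNat
decreasing_by omega

-- the 'for ind, elem in enumerate(a)' loop with state (new_a, new_b)
def ssLoop (b : List Int) : List (Int × Int) → List Int → List Int → List Int × List Int
  | [], na, nb => (na, nb)
  | (ind, elem) :: rest, na, nb =>
      let i := pyScan na elem ((na.length : Int) - 1)
      ssLoop b rest (PySem.List.insert na (i + 1) elem)
                    (PySem.List.insert nb (i + 1) (PySem.List.pyGetD b ind 0))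

def simultaneous_sort (a : List Int) (b : List Int) : List Int × List Int :=
  ssLoop b (PySem.List.enumerate a) [] []

-- ===== PORT B =====
def simultaneous_sort_alt (a : List Int) (b : List Int) : List Int × List Int :=
  let pairs := (PySem.List.enumerate a).map (fun p => (p.2, PySem.List.pyGetD b p.1 0))
  let s := PySem.List.sorted pairs (fun p => p.1)
  (s.map Prod.fst, s.map Prod.snd)

-- ===== PRECONDITION & SPEC =====
-- A evaluates b[ind] for every ind < len(a), so it raises IndexError exactly when len(b) < len(a);
-- Pre_ excludes exactly those inputs.
def Pre_simultaneous_sort (a : List Int) (b : List Int) : Prop := a.length ≤ b.length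
instance (a : List Int) (b : List Int) : Decidable (Pre_simultaneous_sort a b) := by
  unfold Pre_simultaneous_sort; infer_instance

def pvWitness_simultaneous_sort : List Int × List Int := ([3, 1, 2, 1], [10, 20, 30, 40])

def Spec_simultaneous_sort (a : List Int) (b : List Int) (out : List Int × List Int) : Prop :=
  out = simultaneous_sort_alt a b
instance (a : List Int) (b : List Int) (out : List Int × List Int) :
    Decidable (Spec_simultaneous_sort a b out) := by unfold Spec_simultaneous_sort; infer_instance

-- ===== CLAIM (what is proved, stated in full; the proofs are below) =====
def Claim_equal_simultaneous_sort : Prop := ∀ (a : List Int) (b : List Int),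
  Dom_simultaneous_sort a b → Pre_simultaneous_sort a b →
  Spec_simultaneous_sort a b (simultaneous_sort a b)

-- ===== LEMMAS AND PROOFS =====
theorem pyScan_unfold (na : List Int) (e i : Int) :
    pyScan na e i = if 0 ≤ i ∧ PySem.List.pyGetD na i 0 > e then pyScan na e (i - 1) else i := by
  rw [pyScan]

theorem pyScan_neg (na : List Int) (e i : Int) (h : i < 0) : pyScan na e i = i := by
  rw [pyScan_unfold, if_neg]; rintro ⟨h1, -⟩; omega

theorem insertBy_eq {α : Type} (bf : α → α → Bool) (x : α) (s : List α) :
    PySem.List.insertBy bf x s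
      = s.takeWhile (fun y => !bf x y) ++ x :: s.dropWhile (fun y => !bf x y) := by
  induction s with
  | nil => rfl
  | cons y ys ih =>
      by_cases h : bf x y
      · simp [PySem.List.insertBy, h, List.takeWhile, List.dropWhile]
      · simp [PySem.List.insertBy, h, List.takeWhile, List.dropWhile, ih]

theorem pyScan_append_aux : ∀ (n : Nat) (xs : List Int) (z e i : Int),
    (i + 1).toNat ≤ n → i < xs.length →
    pyScan (xs ++ [z]) e i = pyScan xs e i := by
  intro n
  induction n with
  | zero =>
      intro xs z e i hn hi
      rw [pyScan_neg _ _ _ (by omega), pyScan_neg _ _ _ (by omega)]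
  | succ n ih =>
      intro xs z e i hn hi
      by_cases h0 : 0 ≤ i
      · have hget : PySem.List.pyGetD (xs ++ [z]) i 0 = PySem.List.pyGetD xs i 0 := by
          rw [PySem.List.pyGetD_eq_getElem (xs ++ [z]) 0 h0 (by simp; omega),
              PySem.List.pyGetD_eq_getElem xs 0 h0 (by exact_mod_cast hi)]
          rw [List.getElem_append_left (by omega)]
        conv_lhs => rw [pyScan_unfold]
        conv_rhs => rw [pyScan_unfold]
        rw [hget]
        by_cases hc : PySem.List.pyGetD xs i 0 > e
        · simp only [h0, hc, and_self, if_true]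
          exact ih xs z e (i - 1) (by omega) (by omega)
        · simp [hc]
      · rw [pyScan_neg _ _ _ (by omega), pyScan_neg _ _ _ (by omega)]

theorem pyScan_spec : ∀ (na : List Int) (e : Int), na.Pairwise (· ≤ ·) →
    pyScan na e ((na.length : Int) - 1)
      = ((na.takeWhile (fun y => decide (y ≤ e))).length : Int) - 1 := by
  intro na
  induction na using List.reverseRecOn with
  | nil => intro e _; simp [pyScan_neg]
  | append_singleton ys z ih =>
      intro e hp
      have hys : ys.Pairwise (· ≤ ·) := hp.sublist (by simp)
      have hlast : ∀ y ∈ ys, y ≤ z := by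
        intro y hy
        rw [List.pairwise_append] at hp
        exact hp.2.2 y hy z (by simp)
      by_cases hz : z ≤ e
      · -- last element ≤ e: scan returns len ys immediately; takeWhile = everything
        conv_lhs => rw [pyScan_unfold]
        have hget : PySem.List.pyGetD (ys ++ [z]) ((↑(ys ++ [z]).length : Int) - 1) 0 = z := by
          have hlen : ((↑(ys ++ [z]).length : Int) - 1) = ((ys.length : Nat) : Int) := by simp
          rw [hlen, PySem.List.pyGetD_natCast]
          simp [List.getD_eq_getElem?_getD]
        rw [hget]
        have hcond : ¬ (0 ≤ ((↑(ys ++ [z]).length : Int) - 1) ∧ z > e) := by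
          intro ⟨_, h2⟩; omega
        simp only [hcond, if_false]
        have htw : (ys ++ [z]).takeWhile (fun y => decide (y ≤ e)) = ys ++ [z] := by
          refine List.takeWhile_eq_self_iff.mpr ?_
          intro y hy
          rcases List.mem_append.mp hy with hy' | hy'
          · exact decide_eq_true (le_trans (hlast y hy') hz)
          · exact decide_eq_true ((List.mem_singleton.mp hy') ▸ hz)
        rw [htw]
      · -- last element > e: skip it, recurse into ys
        conv_lhs => rw [pyScan_unfold]
        have hget : PySem.List.pyGetD (ys ++ [z]) ((↑(ys ++ [z]).length : Int) - 1) 0 = z := by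
          have hlen : ((↑(ys ++ [z]).length : Int) - 1) = ((ys.length : Nat) : Int) := by simp
          rw [hlen, PySem.List.pyGetD_natCast]
          simp [List.getD_eq_getElem?_getD]
        rw [hget]
        have hcond : (0 ≤ ((↑(ys ++ [z]).length : Int) - 1) ∧ z > e) := by
          refine ⟨?_, by omega⟩
          simp only [List.length_append, List.length_cons, List.length_nil]
          omega
        simp only [hcond, if_true, and_self]
        have hstep : ((↑(ys ++ [z]).length : Int) - 1 - 1) = (ys.length : Int) - 1 := by simp
        rw [hstep]
        rw [pyScan_append_aux ((ys.length : Int) - 1 + 1).toNat ys z e _ (le_refl _) (by omega)]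
        rw [ih e hys]
        have htw : (ys ++ [z]).takeWhile (fun y => decide (y ≤ e)) = ys.takeWhile (fun y => decide (y ≤ e)) := by
          rw [List.takeWhile_append]
          split
          · next h =>
              simp only [show decide (z ≤ e) = false from by simp [hz], List.takeWhile,
                List.append_nil]
              exact ((List.takeWhile_prefix _).eq_of_length h).symm
          · rfl
        rw [htw]

theorem pred_eq (e v : Int) :
    (fun (y : Int × Int) => !(fun p q : Int × Int => decide (p.1 < q.1)) (e, v) y)
      = (fun y : Int × Int => decide (y.1 ≤ e)) := by
  funext y
  show (!decide (e < y.1)) = decide (y.1 ≤ e)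
  rw [← decide_not]
  exact decide_eq_decide.mpr not_lt

theorem step_eq (s : List (Int × Int)) (hs : s.Pairwise (fun p q => p.1 ≤ q.1)) (e v : Int) :
    PySem.List.insert (s.map Prod.fst)
        (pyScan (s.map Prod.fst) e (((s.map Prod.fst).length : Int) - 1) + 1) e
      = (PySem.List.insertBy (fun p q => decide (p.1 < q.1)) (e, v) s).map Prod.fst
  ∧ PySem.List.insert (s.map Prod.snd)
        (pyScan (s.map Prod.fst) e (((s.map Prod.fst).length : Int) - 1) + 1) v
      = (PySem.List.insertBy (fun p q => decide (p.1 < q.1)) (e, v) s).map Prod.snd := by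
  have hp : (s.map Prod.fst).Pairwise (· ≤ ·) := List.pairwise_map.mpr hs
  have hscan := pyScan_spec (s.map Prod.fst) e hp
  have hmapt : (s.map Prod.fst).takeWhile (fun y => decide (y ≤ e))
      = (s.takeWhile (fun y : Int × Int => decide (y.1 ≤ e))).map Prod.fst := by
    rw [List.takeWhile_map]
    rfl
  have hi : pyScan (s.map Prod.fst) e (((s.map Prod.fst).length : Int) - 1) + 1
      = (((s.takeWhile (fun y : Int × Int => decide (y.1 ≤ e))).length : Nat) : Int) := by
    rw [hscan, hmapt, List.length_map]; omega
  have hkle : (s.takeWhile (fun y : Int × Int => decide (y.1 ≤ e))).length ≤ s.length :=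
    (List.takeWhile_sublist _).length_le
  have hins : PySem.List.insertBy (fun p q : Int × Int => decide (p.1 < q.1)) (e, v) s
      = s.takeWhile (fun y : Int × Int => decide (y.1 ≤ e)) ++ (e, v)
          :: s.dropWhile (fun y : Int × Int => decide (y.1 ≤ e)) := by
    rw [insertBy_eq, pred_eq]
  constructor
  · rw [hi, PySem.List.insert_natCast _ _ _ (by simpa using hkle), hins]
    simp only [List.map_append, List.map_cons]
    have hsplit : s.map Prod.fst
        = (s.takeWhile (fun y : Int × Int => decide (y.1 ≤ e))).map Prod.fst
          ++ (s.dropWhile (fun y : Int × Int => decide (y.1 ≤ e))).map Prod.fst := by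
      rw [← List.map_append, List.takeWhile_append_dropWhile]
    rw [hsplit, List.take_left' (by simp), List.drop_left' (by simp)]
  · rw [hi, PySem.List.insert_natCast _ _ _ (by simpa using hkle), hins]
    simp only [List.map_append, List.map_cons]
    have hsplit : s.map Prod.snd
        = (s.takeWhile (fun y : Int × Int => decide (y.1 ≤ e))).map Prod.snd
          ++ (s.dropWhile (fun y : Int × Int => decide (y.1 ≤ e))).map Prod.snd := by
      rw [← List.map_append, List.takeWhile_append_dropWhile]
    rw [hsplit, List.take_left' (by simp), List.drop_left' (by simp)]

theorem insertBy_pairwise (s : List (Int × Int)) (hs : s.Pairwise (fun p q => p.1 ≤ q.1))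
    (e v : Int) :
    (PySem.List.insertBy (fun p q : Int × Int => decide (p.1 < q.1)) (e, v) s).Pairwise
      (fun p q => p.1 ≤ q.1) := by
  rw [insertBy_eq, pred_eq]
  have hd : ∀ q ∈ s.dropWhile (fun y : Int × Int => decide (y.1 ≤ e)), e ≤ q.1 := by
    cases hdw : s.dropWhile (fun y : Int × Int => decide (y.1 ≤ e)) with
    | nil => intro q hq; simp at hq
    | cons z tl =>
        intro q hq
        have hz : e < z.1 := by
          have h := List.head?_dropWhile_not (fun y : Int × Int => decide (y.1 ≤ e)) (l := s)
          rw [hdw] at h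
          simp at h
          omega
        have htl : (z :: tl).Pairwise (fun p q : Int × Int => p.1 ≤ q.1) := by
          rw [← hdw]; exact hs.sublist (List.dropWhile_sublist _)
        rcases List.mem_cons.mp hq with rfl | hq'
        · exact le_of_lt hz
        · exact le_trans (le_of_lt hz) ((List.pairwise_cons.mp htl).1 q hq')
  rw [List.pairwise_append]
  refine ⟨hs.sublist (List.takeWhile_sublist _), ?_, ?_⟩
  · rw [List.pairwise_cons]
    exact ⟨hd, hs.sublist (List.dropWhile_sublist _)⟩
  · intro p hp q hq
    have hple : p.1 ≤ e := by
      have := List.mem_takeWhile_imp hp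
      simpa using this
    rcases List.mem_cons.mp hq with rfl | hq'
    · exact hple
    · exact le_trans hple (hd q hq')

theorem ssLoop_eq (b : List Int) : ∀ (es : List (Int × Int)) (s : List (Int × Int)),
    s.Pairwise (fun p q => p.1 ≤ q.1) →
    ssLoop b es (s.map Prod.fst) (s.map Prod.snd)
      = (((es.map (fun p => (p.2, PySem.List.pyGetD b p.1 0))).foldl
            (fun acc x => PySem.List.insertBy (fun p q : Int × Int => decide (p.1 < q.1)) x acc) s).map Prod.fst,
         ((es.map (fun p => (p.2, PySem.List.pyGetD b p.1 0))).foldl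
            (fun acc x => PySem.List.insertBy (fun p q : Int × Int => decide (p.1 < q.1)) x acc) s).map Prod.snd) := by
  intro es
  induction es with
  | nil => intro s hs; rfl
  | cons hd rest ih =>
      intro s hs
      obtain ⟨ind, elem⟩ := hd
      have hstep := step_eq s hs elem (PySem.List.pyGetD b ind 0)
      simp only [ssLoop, List.map_cons, List.foldl_cons]
      rw [hstep.1, hstep.2]
      exact ih _ (insertBy_pairwise s hs elem (PySem.List.pyGetD b ind 0))

-- ===== VERDICT =====
theorem simultaneous_sort_spec : Claim_equal_simultaneous_sort := by
  intro a b _ _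
  unfold Spec_simultaneous_sort
  show simultaneous_sort a b = simultaneous_sort_alt a b
  unfold simultaneous_sort simultaneous_sort_alt
  have h := ssLoop_eq b (PySem.List.enumerate a) [] List.Pairwise.nil
  simp only [List.map_nil] at h
  rw [h]
  rfl
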